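-- pv_equiv track=rewrite | github.com/yy487/vn-tool | MAI/sct_inject.py | find_texts_in_blob
-- ===== SOURCE A (Python) =====
-- def find_texts_in_blob(blob):
--     segs = []
--     i = 0
--     while i < len(blob) - 1:
--         if blob[i] == 0x23 and blob[i+1] == 0x23:
--             s = i - 1
--             while s > 0 and blob[s] != 0: s -= 1
--             s += 1
--             if s < i: segs.append((s, i+2))
--             i += 2
--         else: i += 1
--     return segs
-- ===== SOURCE B (Python) =====
-- def find_texts_in_blob(blob):
--     segs = []
--     z = 0           # index of the last 0x00 byte seen (0 if none yet)
--     skip = False    # the previous index was the start of a '##' marker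
--     for i in range(len(blob) - 1):
--         if skip:
--             skip = False
--         elif blob[i] == 0x23 and blob[i+1] == 0x23:
--             if z + 1 < i:
--                 segs.append((z + 1, i + 2))
--             skip = True
--         elif blob[i] == 0:
--             z = i
--     return segs
-- ===== Notes on version B (the rewrite author's own statement) =====
-- stated objective: faster
-- what changed: Replaces A's while-loop with jump-by-2 index control and a backward rescan to the previous zero byte at every '##' marker by a single for-loop over all indices with a skip flag, maintaining the last 0x00 index so each segment start is O(1) and the quadratic inner scan disappears.
import Mathlib
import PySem

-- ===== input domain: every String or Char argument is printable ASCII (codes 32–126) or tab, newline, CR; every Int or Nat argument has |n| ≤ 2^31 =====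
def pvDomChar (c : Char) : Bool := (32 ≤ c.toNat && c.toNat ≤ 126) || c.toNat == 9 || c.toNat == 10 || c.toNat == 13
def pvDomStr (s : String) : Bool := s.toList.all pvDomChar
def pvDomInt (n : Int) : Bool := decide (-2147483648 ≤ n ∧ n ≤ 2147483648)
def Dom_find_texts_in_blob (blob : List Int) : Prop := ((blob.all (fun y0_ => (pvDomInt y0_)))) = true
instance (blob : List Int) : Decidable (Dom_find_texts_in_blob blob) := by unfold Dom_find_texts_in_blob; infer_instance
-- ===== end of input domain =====

-- B replaces A's jump-by-2 while-loop with a per-marker backward rescan by one for-loop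
-- over all indices carrying a skip flag and the last 0x00 index (objective: faster, O(n) vs O(n^2)).

-- ===== PORT A =====
-- blob[j] (all accesses in A and B are at in-range nonnegative indices)
def pvGet (blob : List Int) (j : Int) : Int := (PySem.List.pyGet? blob j).getD 0

-- inner loop 'while s > 0 and blob[s] != 0: s -= 1', fuel ≥ s suffices (s decreases to ≥ 0)
def pvBackScan (blob : List Int) (fuel : Nat) (s : Int) : Int :=
  match fuel with
  | 0 => s
  | fuel + 1 => if s > 0 ∧ pvGet blob s ≠ 0 then pvBackScan blob fuel (s - 1) else s

-- outer while-loop of A; fuel ≥ number of remaining iterations (i advances by ≥ 1 each step)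
def pvLoopA (blob : List Int) (fuel : Nat) (segs : List (Int × Int)) (i : Int) : List (Int × Int) :=
  match fuel with
  | 0 => segs
  | fuel + 1 =>
    if i < (blob.length : Int) - 1 then
      if pvGet blob i = 0x23 ∧ pvGet blob (i + 1) = 0x23 then
        let s := pvBackScan blob (i - 1).toNat (i - 1) + 1
        pvLoopA blob fuel (if s < i then segs ++ [(s, i + 2)] else segs) (i + 2)
      else
        pvLoopA blob fuel segs (i + 1)
    else segs

def find_texts_in_blob (blob : List Int) : List (Int × Int) := pvLoopA blob blob.length [] 0

-- ===== PORT B =====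
-- one iteration of B's for-loop body; state = (segs, z = last-0x00 index, skip flag)
def pvStepB (blob : List Int) (st : List (Int × Int) × Int × Bool) (i : Int) :
    List (Int × Int) × Int × Bool :=
  if st.2.2 then (st.1, st.2.1, false)
  else if pvGet blob i = 0x23 ∧ pvGet blob (i + 1) = 0x23 then
    ((if st.2.1 + 1 < i then st.1 ++ [(st.2.1 + 1, i + 2)] else st.1), st.2.1, true)
  else if pvGet blob i = 0 then (st.1, i, false)
  else (st.1, st.2.1, false)

def find_texts_in_blob_alt (blob : List Int) : List (Int × Int) :=
  ((PySem.List.pyRange 0 ((blob.length : Int) - 1) 1).foldl (pvStepB blob) ([], 0, false)).1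

-- ===== PRECONDITION & SPEC =====
def Spec_find_texts_in_blob (blob : List Int) (out : List (Int × Int)) : Prop := out = find_texts_in_blob_alt blob
instance (blob : List Int) (out : List (Int × Int)) : Decidable (Spec_find_texts_in_blob blob out) := by unfold Spec_find_texts_in_blob; infer_instance

-- ===== CLAIM (what is proved, stated in full; the proofs are below) =====
def Claim_equal_find_texts_in_blob : Prop := ∀ (blob : List Int), Dom_find_texts_in_blob blob → Spec_find_texts_in_blob blob (find_texts_in_blob blob)

-- ===== LEMMAS AND PROOFS =====

-- invariant carried through the loops: z is the last zero position before i (0 if none in [1,i-1])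
def pvInv (blob : List Int) (lz i : Int) : Prop :=
  0 ≤ lz ∧ lz ≤ i - 1 ∧ (lz = 0 ∨ pvGet blob lz = 0) ∧
  ∀ j : Int, lz < j → j ≤ i - 1 → pvGet blob j ≠ 0

theorem pvRange_nil (a b : Int) (h : b ≤ a) : PySem.List.pyRange a b 1 = [] := by
  rw [PySem.List.pyRange_one]
  have : (b - a).toNat = 0 := by omega
  simp [this]

theorem pvBackScan_eq (blob : List Int) (fuel : Nat) (s lz : Int) (h0 : 0 ≤ lz) (hls : lz ≤ s)
    (hfuel : (s - lz).toNat ≤ fuel)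
    (hz : lz = 0 ∨ pvGet blob lz = 0)
    (hnz : ∀ j : Int, lz < j → j ≤ s → pvGet blob j ≠ 0) :
    pvBackScan blob fuel s = lz := by
  induction fuel generalizing s with
  | zero =>
    have : s = lz := by omega
    simp [pvBackScan, this]
  | succ fuel ih =>
    rcases eq_or_lt_of_le hls with hsl | hsl
    · subst hsl
      rw [pvBackScan]
      rcases hz with h | h
      · simp [h]
      · simp [h]
    · have hs0 : s > 0 := by omega
      have hsnz : pvGet blob s ≠ 0 := hnz s hsl le_rfl
      rw [pvBackScan]
      simp only [hs0, hsnz, and_true, ne_eq, not_false_eq_true, if_true]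
      exact ih (s - 1) (by omega) (by omega) (fun j hj hj' => hnz j hj (by omega))

-- a fold starting with skip = true just drops its first index
theorem pvFold_skip (blob : List Int) (segs : List (Int × Int)) (lz i b : Int) (hib : i < b) :
    (PySem.List.pyRange i b 1).foldl (pvStepB blob) (segs, lz, true)
    = (PySem.List.pyRange (i + 1) b 1).foldl (pvStepB blob) (segs, lz, false) := by
  rw [PySem.List.pyRange_one_cons hib]
  simp [List.foldl, pvStepB]

theorem pvLoop_eq (blob : List Int) (fuel : Nat) :
    ∀ (i lz : Int) (segs : List (Int × Int)),
    ((i = 0 ∧ lz = 0) ∨ pvInv blob lz i) →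
    ((blob.length : Int) - 1 - i).toNat ≤ fuel →
    pvLoopA blob fuel segs i
    = ((PySem.List.pyRange i ((blob.length : Int) - 1) 1).foldl (pvStepB blob) (segs, lz, false)).1 := by
  induction fuel with
  | zero =>
    intro i lz segs _ hfuel
    have hi : (blob.length : Int) - 1 ≤ i := by omega
    rw [pvRange_nil _ _ hi]
    simp [pvLoopA, List.foldl]
  | succ fuel ih =>
    intro i lz segs hinv hfuel
    by_cases hi : i < (blob.length : Int) - 1
    · rw [pvLoopA, PySem.List.pyRange_one_cons hi]
      simp only [hi, if_true, List.foldl]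
      by_cases hm : pvGet blob i = 0x23 ∧ pvGet blob (i + 1) = 0x23
      · simp only [hm, and_self, if_true, pvStepB, Bool.false_eq_true, if_false]
        have hseg : (if pvBackScan blob (i - 1).toNat (i - 1) + 1 < i then segs ++ [(pvBackScan blob (i - 1).toNat (i - 1) + 1, i + 2)] else segs)
            = (if lz + 1 < i then segs ++ [(lz + 1, i + 2)] else segs) := by
          rcases hinv with ⟨hiz, hlz⟩ | ⟨h0, h1, h2, h3⟩
          · subst hiz; subst hlz
            simp [pvBackScan]
          · rcases lt_or_ge i 1 with hi1 | hi1
            · omega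
            · have hb : pvBackScan blob (i - 1).toNat (i - 1) = lz :=
                pvBackScan_eq blob (i - 1).toNat (i - 1) lz h0 (by omega) (by omega) h2
                  (fun j hj hj' => h3 j hj hj')
              rw [hb]
        rw [hseg]
        have hinv' : ((i + 2 : Int) = 0 ∧ lz = 0) ∨ pvInv blob lz (i + 2) := by
          right
          rcases hinv with ⟨hiz, hlz⟩ | ⟨h0, h1, h2, h3⟩
          · subst hiz; subst hlz
            refine ⟨le_rfl, by omega, Or.inl rfl, ?_⟩
            intro j hj hj'
            have : j = 1 := by omega
            subst this
            have := hm.2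
            simp only [zero_add] at this
            omega
          · refine ⟨h0, by omega, h2, ?_⟩
            intro j hj hj'
            rcases lt_or_ge j i with hji | hji
            · exact h3 j hj (by omega)
            · rcases eq_or_lt_of_le hji with hji' | hji'
              · subst hji'; omega
              · have : j = i + 1 := by omega
                subst this
                have := hm.2; omega
        by_cases hi1 : i + 1 < (blob.length : Int) - 1
        · rw [pvFold_skip blob _ lz (i + 1) _ hi1]
          rw [show i + 1 + 1 = i + 2 by ring]
          exact ih (i + 2) lz _ (by simpa using hinv') (by omega)
        · -- both ranges from i+1 and i+2 are empty
          rw [pvRange_nil (i + 1) _ (by omega)]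
          simp only [List.foldl]
          have h2 : ¬ (i + 2 < (blob.length : Int) - 1) := by omega
          cases fuel <;> simp [pvLoopA, h2]
      · have hstep : pvStepB blob (segs, lz, false) i
            = (segs, (if pvGet blob i = 0 then i else lz), false) := by
          by_cases hz : pvGet blob i = 0 <;> simp [pvStepB, hm, hz]
        simp only [hm, if_false, hstep]
        have hi0 : 0 ≤ i := by
          rcases hinv with ⟨h0, _⟩ | ⟨h1, h2, _⟩ <;> omega
        apply ih
        · right
          by_cases hz : pvGet blob i = 0
          · simp only [hz, if_true]
            exact ⟨hi0, by omega, Or.inr hz, fun j hj hj' => by omega⟩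
          · simp only [hz, if_false]
            rcases hinv with ⟨hiz, hlz⟩ | ⟨h0, h1, h2, h3⟩
            · subst hiz; subst hlz
              exact ⟨le_rfl, by omega, Or.inl rfl, fun j hj hj' => by omega⟩
            · refine ⟨h0, by omega, h2, ?_⟩
              intro j hj hj'
              rcases lt_or_ge j i with hji | hji
              · exact h3 j hj (by omega)
              · have : j = i := by omega
                subst this; exact hz
        · omega
    · rw [pvRange_nil _ _ (by omega), pvLoopA]
      simp [hi, List.foldl]

-- ===== VERDICT (by name: the statement is the Claim_ definition above) =====
theorem find_texts_in_blob_spec : Claim_equal_find_texts_in_blob := by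
  intro blob _
  show find_texts_in_blob blob = find_texts_in_blob_alt blob
  exact pvLoop_eq blob blob.length 0 0 [] (Or.inl ⟨rfl, rfl⟩) (by omega)
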